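-- pv_equiv track=rewrite | github.com/ashwinsharma89/pca_with_pacing_28_Dec | src/query_engine/smart_interpretation.py | _detect_available_dimensions
-- ===== SOURCE A (Python) =====
-- from typing import List, Dict, Any
--
-- def _detect_available_dimensions(columns: List[str]) -> Dict[str, bool]:
--     """Detect which dimensions are available for grouping."""
--     cols_lower = [c.lower() for c in columns]
--
--     return {
--         "campaign": any(kw in cols_lower for kw in ['campaign', 'campaign_name']),
--         "platform": any(kw in cols_lower for kw in ['platform', 'channel', 'source']),
--         "date": any(kw in cols_lower for kw in ['date', 'day', 'timestamp']),
--         "funnel": any(kw in cols_lower for kw in ['funnel', 'stage', 'funnel_stage']),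
--         "device": any(kw in cols_lower for kw in ['device', 'device_type']),
--         "audience": any(kw in cols_lower for kw in ['audience', 'segment', 'targeting']),
--         "creative": any(kw in cols_lower for kw in ['creative', 'ad_name', 'ad_copy']),
--     }
-- ===== SOURCE B (Python) =====
-- from typing import List, Dict, Any
--
-- _DIM_INDEX = {
--     'campaign': 'campaign', 'campaign_name': 'campaign',
--     'platform': 'platform', 'channel': 'platform', 'source': 'platform',
--     'date': 'date', 'day': 'date', 'timestamp': 'date',
--     'funnel': 'funnel', 'stage': 'funnel', 'funnel_stage': 'funnel',
--     'device': 'device', 'device_type': 'device',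
--     'audience': 'audience', 'segment': 'audience', 'targeting': 'audience',
--     'creative': 'creative', 'ad_name': 'creative', 'ad_copy': 'creative',
-- }
--
-- def _detect_available_dimensions(columns: List[str]) -> Dict[str, bool]:
--     """Detect which dimensions are available for grouping (single pass + reverse index)."""
--     result = {dim: False for dim in
--               ("campaign", "platform", "date", "funnel", "device", "audience", "creative")}
--     for c in columns:
--         dim = _DIM_INDEX.get(c.lower())
--         if dim is not None:
--             result[dim] = True
--     return result
-- ===== Notes on version B (the rewrite author's own statement) =====
-- stated objective: faster
-- what changed: Replaces seven per-dimension scans of the column list (any(kw in cols_lower ...)) with a single pass over the columns that consults a precomputed keyword->dimension reverse-index dict and flips flags in a result dict seeded with all seven dimensions False.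
import Mathlib
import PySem

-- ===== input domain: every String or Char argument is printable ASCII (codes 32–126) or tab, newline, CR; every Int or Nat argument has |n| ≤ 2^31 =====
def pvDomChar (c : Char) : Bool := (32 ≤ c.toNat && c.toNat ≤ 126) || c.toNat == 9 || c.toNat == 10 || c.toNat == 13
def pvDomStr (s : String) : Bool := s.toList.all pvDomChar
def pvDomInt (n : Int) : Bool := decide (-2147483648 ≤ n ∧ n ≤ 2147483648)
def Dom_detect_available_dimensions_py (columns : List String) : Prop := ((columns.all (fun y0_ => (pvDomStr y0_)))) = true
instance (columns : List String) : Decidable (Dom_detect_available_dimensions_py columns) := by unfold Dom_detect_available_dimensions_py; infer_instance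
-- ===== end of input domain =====

-- B replaces A's seven per-dimension scans of the column list with one pass over
-- the columns consulting a keyword→dimension reverse index (alternative decomposition).

-- ===== PORT A =====
def detect_available_dimensions_py (columns : List String) : List (String × Bool) :=
  let cols_lower := columns.map PySem.Str.lower
  [("campaign", (["campaign", "campaign_name"] : List String).any (fun kw => cols_lower.contains kw)),
   ("platform", (["platform", "channel", "source"] : List String).any (fun kw => cols_lower.contains kw)),
   ("date", (["date", "day", "timestamp"] : List String).any (fun kw => cols_lower.contains kw)),
   ("funnel", (["funnel", "stage", "funnel_stage"] : List String).any (fun kw => cols_lower.contains kw)),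
   ("device", (["device", "device_type"] : List String).any (fun kw => cols_lower.contains kw)),
   ("audience", (["audience", "segment", "targeting"] : List String).any (fun kw => cols_lower.contains kw)),
   ("creative", (["creative", "ad_name", "ad_copy"] : List String).any (fun kw => cols_lower.contains kw))]

-- ===== PORT B =====
def pvDimIndex : PySem.Dict String String :=
  PySem.Dict.ofList
    [("campaign", "campaign"), ("campaign_name", "campaign"),
     ("platform", "platform"), ("channel", "platform"), ("source", "platform"),
     ("date", "date"), ("day", "date"), ("timestamp", "date"),
     ("funnel", "funnel"), ("stage", "funnel"), ("funnel_stage", "funnel"),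
     ("device", "device"), ("device_type", "device"),
     ("audience", "audience"), ("segment", "audience"), ("targeting", "audience"),
     ("creative", "creative"), ("ad_name", "creative"), ("ad_copy", "creative")]

def detect_available_dimensions_py_alt (columns : List String) : List (String × Bool) :=
  let init : PySem.Dict String Bool :=
    PySem.Dict.ofList
      [("campaign", false), ("platform", false), ("date", false), ("funnel", false),
       ("device", false), ("audience", false), ("creative", false)]
  (columns.foldl (fun d c =>
      match pvDimIndex.get? (PySem.Str.lower c) with
      | some dim => d.insert dim true
      | none => d) init).items

-- ===== PRECONDITION & SPEC =====
def Spec_detect_available_dimensions_py (columns : List String) (out : List (String × Bool)) : Prop := out = detect_available_dimensions_py_alt columns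
instance (columns : List String) (out : List (String × Bool)) : Decidable (Spec_detect_available_dimensions_py columns out) := by unfold Spec_detect_available_dimensions_py; infer_instance

-- ===== CLAIM (what is proved, stated in full; the proofs are below) =====
def Claim_equal_detect_available_dimensions_py : Prop := ∀ (columns : List String), Dom_detect_available_dimensions_py columns → Spec_detect_available_dimensions_py columns (detect_available_dimensions_py columns)

-- ===== LEMMAS AND PROOFS =====

lemma pvContainsMap (columns : List String) (kw : String) :
    (columns.map PySem.Str.lower).contains kw = columns.any (fun c => PySem.Str.lower c == kw) := by
  induction columns with
  | nil => rfl
  | cons c cs ih => simp only [List.map_cons, List.contains_cons, List.any_cons, ih, BEq.comm]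

lemma pvAnyOr {α : Type} (l : List α) (f g : α → Bool) :
    l.any (fun x => f x || g x) = (l.any f || l.any g) := by
  induction l with
  | nil => simp
  | cons a t ih => simp [ih]; cases f a <;> cases g a <;> simp

lemma pvIns_campaign (b1 b2 b3 b4 b5 b6 b7 : Bool) :
    (PySem.Dict.mk [("campaign", b1), ("platform", b2), ("date", b3), ("funnel", b4), ("device", b5), ("audience", b6), ("creative", b7)]).insert "campaign" true
    = PySem.Dict.mk [("campaign", true), ("platform", b2), ("date", b3), ("funnel", b4), ("device", b5), ("audience", b6), ("creative", b7)] := by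
  simp [PySem.Dict.insert, PySem.Dict.contains]

lemma pvIns_platform (b1 b2 b3 b4 b5 b6 b7 : Bool) :
    (PySem.Dict.mk [("campaign", b1), ("platform", b2), ("date", b3), ("funnel", b4), ("device", b5), ("audience", b6), ("creative", b7)]).insert "platform" true
    = PySem.Dict.mk [("campaign", b1), ("platform", true), ("date", b3), ("funnel", b4), ("device", b5), ("audience", b6), ("creative", b7)] := by
  simp [PySem.Dict.insert, PySem.Dict.contains]

lemma pvIns_date (b1 b2 b3 b4 b5 b6 b7 : Bool) :
    (PySem.Dict.mk [("campaign", b1), ("platform", b2), ("date", b3), ("funnel", b4), ("device", b5), ("audience", b6), ("creative", b7)]).insert "date" true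
    = PySem.Dict.mk [("campaign", b1), ("platform", b2), ("date", true), ("funnel", b4), ("device", b5), ("audience", b6), ("creative", b7)] := by
  simp [PySem.Dict.insert, PySem.Dict.contains]

lemma pvIns_funnel (b1 b2 b3 b4 b5 b6 b7 : Bool) :
    (PySem.Dict.mk [("campaign", b1), ("platform", b2), ("date", b3), ("funnel", b4), ("device", b5), ("audience", b6), ("creative", b7)]).insert "funnel" true
    = PySem.Dict.mk [("campaign", b1), ("platform", b2), ("date", b3), ("funnel", true), ("device", b5), ("audience", b6), ("creative", b7)] := by
  simp [PySem.Dict.insert, PySem.Dict.contains]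

lemma pvIns_device (b1 b2 b3 b4 b5 b6 b7 : Bool) :
    (PySem.Dict.mk [("campaign", b1), ("platform", b2), ("date", b3), ("funnel", b4), ("device", b5), ("audience", b6), ("creative", b7)]).insert "device" true
    = PySem.Dict.mk [("campaign", b1), ("platform", b2), ("date", b3), ("funnel", b4), ("device", true), ("audience", b6), ("creative", b7)] := by
  simp [PySem.Dict.insert, PySem.Dict.contains]

lemma pvIns_audience (b1 b2 b3 b4 b5 b6 b7 : Bool) :
    (PySem.Dict.mk [("campaign", b1), ("platform", b2), ("date", b3), ("funnel", b4), ("device", b5), ("audience", b6), ("creative", b7)]).insert "audience" true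
    = PySem.Dict.mk [("campaign", b1), ("platform", b2), ("date", b3), ("funnel", b4), ("device", b5), ("audience", true), ("creative", b7)] := by
  simp [PySem.Dict.insert, PySem.Dict.contains]

lemma pvIns_creative (b1 b2 b3 b4 b5 b6 b7 : Bool) :
    (PySem.Dict.mk [("campaign", b1), ("platform", b2), ("date", b3), ("funnel", b4), ("device", b5), ("audience", b6), ("creative", b7)]).insert "creative" true
    = PySem.Dict.mk [("campaign", b1), ("platform", b2), ("date", b3), ("funnel", b4), ("device", b5), ("audience", b6), ("creative", true)] := by
  simp [PySem.Dict.insert, PySem.Dict.contains]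


lemma fold_items (cols : List String) (b1 b2 b3 b4 b5 b6 b7 : Bool) :
    (cols.foldl (fun d c =>
        match pvDimIndex.get? (PySem.Str.lower c) with
        | some dim => d.insert dim true
        | none => d)
      (PySem.Dict.mk [("campaign", b1), ("platform", b2), ("date", b3), ("funnel", b4),
        ("device", b5), ("audience", b6), ("creative", b7)])).items
    = [("campaign", b1 || cols.any (fun c => PySem.Str.lower c == "campaign" || PySem.Str.lower c == "campaign_name")),
       ("platform", b2 || cols.any (fun c => PySem.Str.lower c == "platform" || PySem.Str.lower c == "channel" || PySem.Str.lower c == "source")),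
       ("date", b3 || cols.any (fun c => PySem.Str.lower c == "date" || PySem.Str.lower c == "day" || PySem.Str.lower c == "timestamp")),
       ("funnel", b4 || cols.any (fun c => PySem.Str.lower c == "funnel" || PySem.Str.lower c == "stage" || PySem.Str.lower c == "funnel_stage")),
       ("device", b5 || cols.any (fun c => PySem.Str.lower c == "device" || PySem.Str.lower c == "device_type")),
       ("audience", b6 || cols.any (fun c => PySem.Str.lower c == "audience" || PySem.Str.lower c == "segment" || PySem.Str.lower c == "targeting")),
       ("creative", b7 || cols.any (fun c => PySem.Str.lower c == "creative" || PySem.Str.lower c == "ad_name" || PySem.Str.lower c == "ad_copy"))] := by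
  induction cols generalizing b1 b2 b3 b4 b5 b6 b7 with
  | nil => simp
  | cons c cs ih =>
    simp only [List.foldl_cons, List.any_cons]
    by_cases h1 : PySem.Str.lower c = "campaign"
    · have hg : pvDimIndex.get? (PySem.Str.lower c) = some "campaign" := by rw [h1]; decide
      simp only [hg, pvIns_campaign]
      rw [ih]; simp [h1]
    by_cases h2 : PySem.Str.lower c = "campaign_name"
    · have hg : pvDimIndex.get? (PySem.Str.lower c) = some "campaign" := by rw [h2]; decide
      simp only [hg, pvIns_campaign]
      rw [ih]; simp [h2]
    by_cases h3 : PySem.Str.lower c = "platform"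
    · have hg : pvDimIndex.get? (PySem.Str.lower c) = some "platform" := by rw [h3]; decide
      simp only [hg, pvIns_platform]
      rw [ih]; simp [h3]
    by_cases h4 : PySem.Str.lower c = "channel"
    · have hg : pvDimIndex.get? (PySem.Str.lower c) = some "platform" := by rw [h4]; decide
      simp only [hg, pvIns_platform]
      rw [ih]; simp [h4]
    by_cases h5 : PySem.Str.lower c = "source"
    · have hg : pvDimIndex.get? (PySem.Str.lower c) = some "platform" := by rw [h5]; decide
      simp only [hg, pvIns_platform]
      rw [ih]; simp [h5]
    by_cases h6 : PySem.Str.lower c = "date"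
    · have hg : pvDimIndex.get? (PySem.Str.lower c) = some "date" := by rw [h6]; decide
      simp only [hg, pvIns_date]
      rw [ih]; simp [h6]
    by_cases h7 : PySem.Str.lower c = "day"
    · have hg : pvDimIndex.get? (PySem.Str.lower c) = some "date" := by rw [h7]; decide
      simp only [hg, pvIns_date]
      rw [ih]; simp [h7]
    by_cases h8 : PySem.Str.lower c = "timestamp"
    · have hg : pvDimIndex.get? (PySem.Str.lower c) = some "date" := by rw [h8]; decide
      simp only [hg, pvIns_date]
      rw [ih]; simp [h8]
    by_cases h9 : PySem.Str.lower c = "funnel"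
    · have hg : pvDimIndex.get? (PySem.Str.lower c) = some "funnel" := by rw [h9]; decide
      simp only [hg, pvIns_funnel]
      rw [ih]; simp [h9]
    by_cases h10 : PySem.Str.lower c = "stage"
    · have hg : pvDimIndex.get? (PySem.Str.lower c) = some "funnel" := by rw [h10]; decide
      simp only [hg, pvIns_funnel]
      rw [ih]; simp [h10]
    by_cases h11 : PySem.Str.lower c = "funnel_stage"
    · have hg : pvDimIndex.get? (PySem.Str.lower c) = some "funnel" := by rw [h11]; decide
      simp only [hg, pvIns_funnel]
      rw [ih]; simp [h11]
    by_cases h12 : PySem.Str.lower c = "device"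
    · have hg : pvDimIndex.get? (PySem.Str.lower c) = some "device" := by rw [h12]; decide
      simp only [hg, pvIns_device]
      rw [ih]; simp [h12]
    by_cases h13 : PySem.Str.lower c = "device_type"
    · have hg : pvDimIndex.get? (PySem.Str.lower c) = some "device" := by rw [h13]; decide
      simp only [hg, pvIns_device]
      rw [ih]; simp [h13]
    by_cases h14 : PySem.Str.lower c = "audience"
    · have hg : pvDimIndex.get? (PySem.Str.lower c) = some "audience" := by rw [h14]; decide
      simp only [hg, pvIns_audience]
      rw [ih]; simp [h14]
    by_cases h15 : PySem.Str.lower c = "segment"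
    · have hg : pvDimIndex.get? (PySem.Str.lower c) = some "audience" := by rw [h15]; decide
      simp only [hg, pvIns_audience]
      rw [ih]; simp [h15]
    by_cases h16 : PySem.Str.lower c = "targeting"
    · have hg : pvDimIndex.get? (PySem.Str.lower c) = some "audience" := by rw [h16]; decide
      simp only [hg, pvIns_audience]
      rw [ih]; simp [h16]
    by_cases h17 : PySem.Str.lower c = "creative"
    · have hg : pvDimIndex.get? (PySem.Str.lower c) = some "creative" := by rw [h17]; decide
      simp only [hg, pvIns_creative]
      rw [ih]; simp [h17]
    by_cases h18 : PySem.Str.lower c = "ad_name"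
    · have hg : pvDimIndex.get? (PySem.Str.lower c) = some "creative" := by rw [h18]; decide
      simp only [hg, pvIns_creative]
      rw [ih]; simp [h18]
    by_cases h19 : PySem.Str.lower c = "ad_copy"
    · have hg : pvDimIndex.get? (PySem.Str.lower c) = some "creative" := by rw [h19]; decide
      simp only [hg, pvIns_creative]
      rw [ih]; simp [h19]
    · have hd : pvDimIndex = PySem.Dict.mk [("campaign", "campaign"), ("campaign_name", "campaign"), ("platform", "platform"), ("channel", "platform"), ("source", "platform"), ("date", "date"), ("day", "date"), ("timestamp", "date"), ("funnel", "funnel"), ("stage", "funnel"), ("funnel_stage", "funnel"), ("device", "device"), ("device_type", "device"), ("audience", "audience"), ("segment", "audience"), ("targeting", "audience"), ("creative", "creative"), ("ad_name", "creative"), ("ad_copy", "creative")] := by decide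
      have hg : pvDimIndex.get? (PySem.Str.lower c) = none := by
        simp [hd, PySem.Dict.get?, Ne.symm h1, Ne.symm h2, Ne.symm h3, Ne.symm h4, Ne.symm h5, Ne.symm h6, Ne.symm h7, Ne.symm h8, Ne.symm h9, Ne.symm h10, Ne.symm h11, Ne.symm h12, Ne.symm h13, Ne.symm h14, Ne.symm h15, Ne.symm h16, Ne.symm h17, Ne.symm h18, Ne.symm h19]
      simp only [hg]
      rw [ih]; simp [beq_eq_false_iff_ne.mpr h1, beq_eq_false_iff_ne.mpr h2, beq_eq_false_iff_ne.mpr h3, beq_eq_false_iff_ne.mpr h4, beq_eq_false_iff_ne.mpr h5, beq_eq_false_iff_ne.mpr h6, beq_eq_false_iff_ne.mpr h7, beq_eq_false_iff_ne.mpr h8, beq_eq_false_iff_ne.mpr h9, beq_eq_false_iff_ne.mpr h10, beq_eq_false_iff_ne.mpr h11, beq_eq_false_iff_ne.mpr h12, beq_eq_false_iff_ne.mpr h13, beq_eq_false_iff_ne.mpr h14, beq_eq_false_iff_ne.mpr h15, beq_eq_false_iff_ne.mpr h16, beq_eq_false_iff_ne.mpr h17, beq_eq_false_iff_ne.mpr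 h18, beq_eq_false_iff_ne.mpr h19]

-- ===== VERDICT (by name: the statement is the Claim_ definition above) =====
theorem detect_available_dimensions_py_spec : Claim_equal_detect_available_dimensions_py := by
  intro columns _
  unfold Spec_detect_available_dimensions_py detect_available_dimensions_py detect_available_dimensions_py_alt
  have hinit : (PySem.Dict.ofList
      [("campaign", false), ("platform", false), ("date", false), ("funnel", false),
       ("device", false), ("audience", false), ("creative", false)] : PySem.Dict String Bool)
      = PySem.Dict.mk [("campaign", false), ("platform", false), ("date", false), ("funnel", false),
       ("device", false), ("audience", false), ("creative", false)] := by decide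
  rw [hinit, fold_items]
  simp only [List.any_cons, List.any_nil, Bool.or_false, Bool.false_or, pvAnyOr,
    pvContainsMap, Bool.or_assoc]
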